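-- pv_equiv track=rewrite | github.com/repeater1384/2022_Python_repeater1384 | HelpTool.py | shake_number
-- ===== SOURCE A (Python) =====
-- import itertools
--
-- def shake_number(num):
--     len_num = len(str(num))
--     shaked_number_list = []
--     for indiv in itertools.permutations(range(len_num)):
--         temp = ''
--         if str(num)[indiv[0]] == '0': continue
--         for idx in indiv:
--             temp += str(num)[idx]
--         shaked_number_list.append(int(temp))
--     return shaked_number_list
-- ===== SOURCE B (Python) =====
-- def shake_number(num):
--     s = str(num)
--
--     def go(prefix, rest):
--         if not rest:
--             return [int(prefix)]
--         out = []
--         for k in range(len(rest)):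
--             out += go(prefix + rest[k], rest[:k] + rest[k + 1:])
--         return out
--
--     result = []
--     for k in range(len(s)):
--         if s[k] != '0':
--             result += go(s[k], s[:k] + s[k + 1:])
--     return result
-- ===== Notes on version B (the rewrite author's own statement) =====
-- stated objective: alternative
-- what changed: Replaced itertools.permutations over index tuples plus per-permutation string rebuilding by a hand-written recursive permutation generator that permutes the characters of str(num) directly, carrying the growing prefix and shrinking remainder, with the leading-zero skip hoisted to the first-character choice.
import Mathlib
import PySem

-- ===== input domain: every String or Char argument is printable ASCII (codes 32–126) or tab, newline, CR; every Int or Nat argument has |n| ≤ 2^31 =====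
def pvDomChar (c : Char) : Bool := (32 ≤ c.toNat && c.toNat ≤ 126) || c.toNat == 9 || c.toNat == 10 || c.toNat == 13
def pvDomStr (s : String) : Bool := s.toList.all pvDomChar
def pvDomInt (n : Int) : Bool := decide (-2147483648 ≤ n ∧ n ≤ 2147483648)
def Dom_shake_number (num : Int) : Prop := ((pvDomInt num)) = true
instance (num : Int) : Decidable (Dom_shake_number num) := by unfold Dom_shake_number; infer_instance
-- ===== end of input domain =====

-- B replaces itertools.permutations over index tuples (plus per-permutation string rebuilding)
-- by a hand-written recursive permutation generator over the characters themselves (objective: alternative).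

-- ===== PORT A =====
-- len(str(num)) : str → List Char via PySem.Int.toChars (exact), len via PySem.List.len.
-- str(num)[idx] : indices come from permutations of range(len), hence always in range, so
-- PySem.List.pyGetD is exact here.  int(temp) : PySem.Int.ofChars?; under Pre_ (0 ≤ num) temp is a
-- nonempty digit string, so the parse succeeds and the .getD 0 default is never reached.
def shake_number (num : Int) : List Int :=
  let lenNum : Int := PySem.List.len (PySem.Int.toChars num)
  (PySem.List.permutations (PySem.List.pyRange 0 lenNum 1)
      (PySem.List.pyRange 0 lenNum 1).length).foldl
    (fun acc indiv =>
      if PySem.List.pyGetD (PySem.Int.toChars num) (PySem.List.pyGetD indiv 0 0) ' ' = '0' then acc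
      else acc ++ [(PySem.Int.ofChars?
        (indiv.foldl (fun temp idx =>
          temp ++ [PySem.List.pyGetD (PySem.Int.toChars num) idx ' ']) [])).getD 0]) []

-- ===== PORT B =====
-- go(prefix, rest) of Source B: rest[k] via pyGetD (k ∈ range(len(rest)), always in range),
-- rest[:k] + rest[k+1:] via PySem.List.slice, int(prefix) via PySem.Int.ofChars? (succeeds under Pre_).
def pvGo (pre rest : List Char) : List Int :=
  if rest = [] then [(PySem.Int.ofChars? pre).getD 0]
  else
    (PySem.List.pyRange 0 (PySem.List.len rest) 1).attach.foldl
      (fun acc k =>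
        acc ++ pvGo (pre ++ [PySem.List.pyGetD rest k.1 ' '])
          (PySem.List.slice rest none (some k.1) ++ PySem.List.slice rest (some (k.1+1)) none))
      []
termination_by rest.length
decreasing_by
  obtain ⟨h0, hlt⟩ := (PySem.List.mem_pyRange_one.mp k.2)
  rw [PySem.List.slice_to rest h0, PySem.List.slice_from rest (by omega : (0:Int) ≤ k.1 + 1)]
  have hk : k.1.toNat < rest.length := by
    simp [PySem.List.len_eq] at hlt; omega
  have h1 : (k.1 + 1).toNat = k.1.toNat + 1 := by omega
  simp [List.length_append, List.length_take, List.length_drop, h1]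
  omega

def shake_number_alt (num : Int) : List Int :=
  let s := PySem.Int.toChars num
  (PySem.List.pyRange 0 (PySem.List.len s) 1).foldl
    (fun res k =>
      if PySem.List.pyGetD s k ' ' ≠ '0' then
        res ++ pvGo [PySem.List.pyGetD s k ' ']
          (PySem.List.slice s none (some k) ++ PySem.List.slice s (some (k+1)) none)
      else res) []

-- ===== PRECONDITION & SPEC =====
-- A raises ValueError on every negative num: str(num) contains '-', and some permutation puts it
-- in a non-leading position (or int('-') style strings arise), so int(temp) fails; Pre_ excludes
-- exactly those inputs.  Both the Python A and the Python B raise there.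
def Pre_shake_number (num : Int) : Prop := 0 ≤ num
instance (num : Int) : Decidable (Pre_shake_number num) := by unfold Pre_shake_number; infer_instance
def pvWitness_shake_number : Int := (102)
def Spec_shake_number (num : Int) (out : List Int) : Prop := out = shake_number_alt num
instance (num : Int) (out : List Int) : Decidable (Spec_shake_number num out) := by unfold Spec_shake_number; infer_instance

-- ===== CLAIM (what is proved, stated in full; the proofs are below) =====
def Claim_equal_shake_number : Prop := ∀ (num : Int), Dom_shake_number num → Pre_shake_number num → Spec_shake_number num (shake_number num)

-- ===== LEMMAS AND PROOFS =====

theorem pvCore_ne_nil : ∀ (fuel n : Nat) (ds : List Char), ds ≠ [] → Nat.toDigitsCore 10 fuel n ds ≠ [] := by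
  intro fuel
  induction fuel with
  | zero => intro n ds h; rw [Nat.toDigitsCore]; exact h
  | succ f ih =>
    intro n ds h
    rw [Nat.toDigitsCore]
    split
    · exact List.cons_ne_nil _ _
    · exact ih _ _ (List.cons_ne_nil _ _)

theorem pvToDigits10_ne_nil (n : Nat) : Nat.toDigits 10 n ≠ [] := by
  unfold Nat.toDigits
  rw [Nat.toDigitsCore]
  split
  · exact List.cons_ne_nil _ _
  · exact pvCore_ne_nil _ _ _ (List.cons_ne_nil _ _)

theorem pvToChars_ne_nil (n : Int) : PySem.Int.toChars n ≠ [] := by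
  unfold PySem.Int.toChars
  split
  · exact List.cons_ne_nil _ _
  · exact pvToDigits10_ne_nil _

-- unfolding equations for PySem.List.permutations
theorem pvPerms_zero {α : Type} (xs : List α) : PySem.List.permutations xs 0 = [[]] := by
  rw [PySem.List.permutations]

theorem pvPerms_succ {α : Type} (xs : List α) (r : Nat) : PySem.List.permutations xs (r+1) =
    (List.range xs.length).flatMap (fun i => match xs[i]? with
      | none => []
      | some x => (PySem.List.permutations (xs.eraseIdx i) r).map (fun p => x :: p)) := by
  rw [PySem.List.permutations]
  exact List.flatMap_congr (fun i _ => by cases xs[i]? <;> rfl)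

-- permutations is positional, so it commutes with map
theorem pvPerms_map {α β : Type} (f : α → β) : ∀ (r : Nat) (l : List α),
    PySem.List.permutations (l.map f) r = (PySem.List.permutations l r).map (List.map f) := by
  intro r
  induction r with
  | zero => intro l; rw [pvPerms_zero, pvPerms_zero]; simp
  | succ r ih =>
    intro l
    rw [pvPerms_succ, pvPerms_succ, List.length_map, List.map_flatMap]
    apply List.flatMap_congr
    intro i _
    rw [List.getElem?_map]
    cases h : l[i]? with
    | none => rfl
    | some x =>
      simp only [Option.map_some]
      rw [List.eraseIdx_map, ih]
      simp [List.map_map, Function.comp_def]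

-- normalisation of the two loop shapes into flatMap form
theorem pvFoldl_if_skip {α β : Type} (P : α → Prop) [DecidablePred P] (f : α → β) (l : List α) :
    l.foldl (fun acc x => if P x then acc else acc ++ [f x]) [] =
      l.flatMap (fun x => if P x then [] else [f x]) := by
  have h : (fun (acc : List β) x => if P x then acc else acc ++ [f x])
      = fun acc x => acc ++ (if P x then [] else [f x]) := by
    funext acc x; by_cases hP : P x <;> simp [hP]
  rw [h, PySem.List.foldl_append_eq_flatMap, List.nil_append]

theorem pvFoldl_if_ext {α β : Type} (P : α → Prop) [DecidablePred P] (g : α → List β) (l : List α) :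
    l.foldl (fun acc x => if P x then acc ++ g x else acc) [] =
      l.flatMap (fun x => if P x then g x else []) := by
  have h : (fun (acc : List β) x => if P x then acc ++ g x else acc)
      = fun acc x => acc ++ (if P x then g x else []) := by
    funext acc x; by_cases hP : P x <;> simp [hP]
  rw [h, PySem.List.foldl_append_eq_flatMap, List.nil_append]

theorem pvFlatMap_const_ite {β γ : Type} (C : Prop) [Decidable C] (F : β → γ) (l : List β) :
    l.flatMap (fun p => if C then [] else [F p]) = if C then [] else l.map F := by
  by_cases hC : C <;> simp [hC, ← List.map_eq_flatMap]

-- rest[:k] + rest[k+1:] is eraseIdx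
theorem pvSlice_eraseIdx {α : Type} (xs : List α) (j : Nat) :
    PySem.List.slice xs none (some (j:Int)) ++ PySem.List.slice xs (some ((j:Int)+1)) none
      = xs.eraseIdx j := by
  rw [PySem.List.slice_to_natCast]
  have h : ((j:Int)+1) = ((j+1 : Nat) : Int) := by push_cast; ring
  rw [h, PySem.List.slice_from_natCast]
  exact (List.eraseIdx_eq_take_drop_succ xs j).symm

theorem pvPyRange_len {α : Type} (xs : List α) :
    PySem.List.pyRange 0 (PySem.List.len xs) 1 = (List.range xs.length).map (Nat.cast : Nat → Int) := by
  rw [PySem.List.pyRange_one]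
  simp [PySem.List.len_eq]

-- the recursive generator enumerates exactly the permutations, in itertools' order
theorem pvGo_spec : ∀ (n : Nat) (rest pre : List Char), rest.length = n →
    pvGo pre rest = (PySem.List.permutations rest n).map
      (fun p => (PySem.Int.ofChars? (pre ++ p)).getD 0) := by
  intro n
  induction n with
  | zero =>
    intro rest pre h
    have hnil : rest = [] := List.eq_nil_of_length_eq_zero h
    subst hnil
    rw [pvGo]
    rw [pvPerms_zero]
    simp
  | succ m ih =>
    intro rest pre h
    have hne : rest ≠ [] := by intro e; subst e; simp at h
    rw [pvGo, if_neg hne,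
      @List.foldl_attach _ _ (PySem.List.pyRange 0 (PySem.List.len rest) 1)
        (fun acc x => acc ++ pvGo (pre ++ [PySem.List.pyGetD rest x ' '])
          (PySem.List.slice rest none (some x) ++ PySem.List.slice rest (some (x+1)) none)) [],
      PySem.List.foldl_append_eq_flatMap, List.nil_append,
      pvPyRange_len, List.flatMap_map, pvPerms_succ, List.map_flatMap]
    apply List.flatMap_congr
    intro j hj
    have hj' : j < rest.length := List.mem_range.mp hj
    rw [List.getElem?_eq_getElem hj']
    dsimp only
    have hg : PySem.List.pyGetD rest (j:Int) ' ' = rest[j] := by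
      rw [PySem.List.pyGetD_natCast]
      exact List.getD_eq_getElem rest ' ' hj'
    rw [hg, pvSlice_eraseIdx, ih _ _ (by rw [List.length_eraseIdx_of_lt hj', h]; rfl),
        List.map_map]
    apply List.map_congr_left
    intro p _
    simp

-- ===== VERDICT (by name: the statement is the Claim_ definition above) =====
theorem shake_number_spec : Claim_equal_shake_number := by
  intro num _ _
  unfold Spec_shake_number
  simp only [shake_number, shake_number_alt]
  set s : List Char := PySem.Int.toChars num with hs
  obtain ⟨m, hm⟩ : ∃ m, s.length = m + 1 := by
    cases hcs : s with
    | nil => exact absurd hcs (pvToChars_ne_nil num)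
    | cons c cs => exact ⟨cs.length, by simp⟩
  rw [pvFoldl_if_skip (fun indiv => PySem.List.pyGetD s (PySem.List.pyGetD indiv 0 0) ' ' = '0')
        (fun indiv => (PySem.Int.ofChars?
          (indiv.foldl (fun temp idx => temp ++ [PySem.List.pyGetD s idx ' ']) [])).getD 0),
      pvFoldl_if_ext (fun k => PySem.List.pyGetD s k ' ' ≠ '0')
        (fun k => pvGo [PySem.List.pyGetD s k ' ']
          (PySem.List.slice s none (some k) ++ PySem.List.slice s (some (k+1)) none))]
  have hlen : (PySem.List.pyRange 0 (PySem.List.len s) 1).length = m + 1 := by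
    rw [pvPyRange_len]; simp [hm]
  rw [hlen, pvPerms_succ, hlen, List.flatMap_assoc, pvPyRange_len, List.flatMap_map, hm]
  apply List.flatMap_congr
  intro j hj
  have hj' : j < m + 1 := List.mem_range.mp hj
  have hj'' : j < s.length := by omega
  have hidx : (List.map (Nat.cast : Nat → Int) (List.range (m + 1)))[j]? = some ((j : Nat) : Int) := by
    simp [hj']
  rw [hidx]
  dsimp only
  rw [List.flatMap_map]
  have hlen2 : (s.eraseIdx j).length = m := by
    rw [List.length_eraseIdx_of_lt hj'', hm]
    omega
  -- B side
  rw [pvSlice_eraseIdx s j, pvGo_spec m (s.eraseIdx j) _ hlen2]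
  have hsg : s.eraseIdx j
      = ((List.map (Nat.cast : Nat → Int) (List.range (m + 1))).eraseIdx j).map
          (fun k => PySem.List.pyGetD s k ' ') := by
    rw [← List.eraseIdx_map, ← hm, ← pvPyRange_len, PySem.List.map_pyGetD_pyRange_zero]
  rw [hsg, pvPerms_map, List.map_map]
  -- A side body
  have hbody : (fun (p : List Int) =>
      if PySem.List.pyGetD s (PySem.List.pyGetD (((j : Nat) : Int) :: p) 0 0) ' ' = '0' then
        ([] : List Int)
      else [(PySem.Int.ofChars? ((((j : Nat) : Int) :: p).foldl
        (fun temp idx => temp ++ [PySem.List.pyGetD s idx ' ']) [])).getD 0])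
      = fun p =>
      if PySem.List.pyGetD s ((j : Nat) : Int) ' ' = '0' then ([] : List Int)
      else [(PySem.Int.ofChars?
        (PySem.List.pyGetD s ((j : Nat) : Int) ' ' :: p.map (fun idx => PySem.List.pyGetD s idx ' '))).getD 0] := by
    funext p
    rw [PySem.List.pyGetD_zero_cons, PySem.List.foldl_append_singleton_eq_map, List.nil_append,
        List.map_cons]
  rw [hbody, pvFlatMap_const_ite]
  by_cases hC : PySem.List.pyGetD s ((j : Nat) : Int) ' ' = '0'
  · simp [hC]
  · simp only [hC, if_neg, ne_eq, not_false_iff, if_pos]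
    apply List.map_congr_left
    intro p _
    simp
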